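-- pv_equiv track=rewrite | github.com/pypi-data/pypi-mirror-401 | packages/cate/cate-1.1.tar.gz/cate-1.1/src/cate/core.py | _is_valid_transition
-- ===== SOURCE A (Python) =====
-- def _is_valid_transition(transition):
--     """Return True iff every strand is used in at most one crossing."""
--     already_encountered = set()
--     for crossing in transition:
--         for strand in crossing:
--             if strand in already_encountered:
--                 return False  # strand is used more than once
--             already_encountered.add(strand)
--     return True
-- ===== SOURCE B (Python) =====
-- def _is_valid_transition(transition):
--     flat = sorted(strand for crossing in transition for strand in crossing)
--     return all(a != b for a, b in zip(flat, flat[1:]))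
-- ===== Notes on version B (the rewrite author's own statement) =====
-- stated objective: alternative
-- what changed: Replaces the stateful seen-set with early exit by a sort-based duplicate check: sort the flattened strands and verify no two adjacent sorted elements are equal (no set, no early return).
import Mathlib
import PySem

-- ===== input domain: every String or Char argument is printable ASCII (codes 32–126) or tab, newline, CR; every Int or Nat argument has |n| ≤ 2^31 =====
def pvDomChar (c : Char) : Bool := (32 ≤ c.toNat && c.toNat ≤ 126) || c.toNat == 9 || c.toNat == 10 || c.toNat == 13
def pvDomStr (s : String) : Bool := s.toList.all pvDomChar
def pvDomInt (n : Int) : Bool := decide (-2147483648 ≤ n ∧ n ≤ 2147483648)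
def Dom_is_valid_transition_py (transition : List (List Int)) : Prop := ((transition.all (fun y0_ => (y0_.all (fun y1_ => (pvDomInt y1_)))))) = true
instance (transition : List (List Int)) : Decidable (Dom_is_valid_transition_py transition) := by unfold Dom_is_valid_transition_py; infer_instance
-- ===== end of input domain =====

-- B replaces A's stateful seen-set with early exit by sort-then-adjacent-scan:
-- sort the flattened strands and check no two neighbours are equal. Objective: alternative (no set, no early return).

-- ===== PORT A =====
-- inner 'for strand in crossing' loop; none = the early 'return False'
def pvGoStrand (crossing : List Int) (seen : PySem.Set Int) : Option (PySem.Set Int) :=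
  match crossing with
  | [] => some seen
  | strand :: rest =>
    if PySem.Set.contains seen strand then none
    else pvGoStrand rest (PySem.Set.add seen strand)

-- outer 'for crossing in transition' loop
def pvGoCross (transition : List (List Int)) (seen : PySem.Set Int) : Bool :=
  match transition with
  | [] => true
  | crossing :: rest =>
    match pvGoStrand crossing seen with
    | none => false
    | some seen' => pvGoCross rest seen'

def is_valid_transition_py (transition : List (List Int)) : Bool :=
  pvGoCross transition PySem.Set.empty

-- ===== PORT B =====
def is_valid_transition_py_alt (transition : List (List Int)) : Bool :=
  let flat := PySem.List.sorted (transition.flatMap (fun crossing => crossing)) (fun x => x) false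
  (flat.zip (PySem.List.slice flat (some 1) none)).all (fun p => p.1 != p.2)

-- ===== PRECONDITION & SPEC =====
def Spec_is_valid_transition_py (transition : List (List Int)) (out : Bool) : Prop := out = is_valid_transition_py_alt transition
instance (transition : List (List Int)) (out : Bool) : Decidable (Spec_is_valid_transition_py transition out) := by unfold Spec_is_valid_transition_py; infer_instance

-- ===== CLAIM (what is proved, stated in full; the proofs are below) =====
def Claim_equal_is_valid_transition_py : Prop := ∀ (transition : List (List Int)), Dom_is_valid_transition_py transition → Spec_is_valid_transition_py transition (is_valid_transition_py transition)

-- ===== LEMMAS AND PROOFS =====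

-- the inner loop returns some (s updated with c) iff c is duplicate-free and disjoint from s
theorem pvGoStrand_eq (c : List Int) (s : PySem.Set Int) :
    pvGoStrand c s =
      if (∀ x ∈ c, x ∉ s) ∧ c.Nodup then some (PySem.Set.update s c) else none := by
  induction c generalizing s with
  | nil => simp [pvGoStrand, PySem.Set.update]
  | cons x c ih =>
    by_cases hx : x ∈ s
    · simp only [pvGoStrand, PySem.Set.contains_eq_listContains, List.contains_eq_mem,
        decide_eq_true_eq, hx, if_true]
      symm
      rw [if_neg]
      rintro ⟨hdisj, _⟩
      exact hdisj x (by simp) hx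
    · simp only [pvGoStrand, PySem.Set.contains_eq_listContains, List.contains_eq_mem,
        decide_eq_true_eq, hx, if_false]
      rw [ih, PySem.Set.update_cons]
      apply if_congr _ rfl rfl
      simp only [PySem.Set.mem_add, List.nodup_cons, List.mem_cons]
      constructor
      · rintro ⟨hdisj, hnd⟩
        have h1 : ∀ y ∈ c, y ∉ s := fun y hy hys => hdisj y hy (Or.inl hys)
        have h2 : x ∉ c := fun hxc => hdisj x hxc (Or.inr rfl)
        refine ⟨?_, h2, hnd⟩
        rintro y (rfl | hy)
        · exact hx
        · exact h1 y hy
      · rintro ⟨hdisj, hxnc, hnd⟩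
        refine ⟨?_, hnd⟩
        rintro y hy (hys | rfl)
        · exact hdisj y (Or.inr hy) hys
        · exact hxnc hy

-- A's loop decides Nodup-and-disjoint-from-seen of the flattened suffix
theorem pvGoCross_eq (ts : List (List Int)) (s : PySem.Set Int) (hs : s.Nodup) :
    pvGoCross ts s =
      decide ((∀ x ∈ ts.flatMap (fun crossing => crossing), x ∉ s) ∧
        (ts.flatMap (fun crossing => crossing)).Nodup) := by
  induction ts generalizing s with
  | nil => simp [pvGoCross]
  | cons c ts ih =>
    rw [pvGoCross, pvGoStrand_eq]
    by_cases h : (∀ x ∈ c, x ∉ s) ∧ c.Nodup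
    · rw [if_pos h]
      have hred : (match some (PySem.Set.update s c) with
          | none => false
          | some seen' => pvGoCross ts seen') = pvGoCross ts (PySem.Set.update s c) := rfl
      rw [hred]
      have hdup : PySem.Set.update s c = s ++ c :=
        PySem.Set.update_eq_append_of_disjoint s c h.2 h.1
      have hnd : (PySem.Set.update s c).Nodup := by
        rw [hdup]
        refine List.Nodup.append hs h.2 ?_
        intro a ha hac
        exact h.1 a hac ha
      rw [ih _ hnd]
      apply decide_eq_decide.mpr
      rw [hdup]
      simp only [List.flatMap_cons, List.nodup_append, List.mem_append]
      constructor
      · rintro ⟨hdisj, hnd2⟩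
        refine ⟨?_, h.2, hnd2, ?_⟩
        · rintro x (hx | hx)
          · exact h.1 x hx
          · exact fun hxs => (hdisj x hx) (Or.inl hxs)
        · intro a hac b hbf hab
          exact (hdisj b hbf) (Or.inr (hab ▸ hac))
      · rintro ⟨hdisj, _, hnd2, hsep⟩
        refine ⟨?_, hnd2⟩
        rintro x hx (hxs | hxc)
        · exact hdisj x (Or.inr hx) hxs
        · exact hsep x hxc x hx rfl
    · rw [if_neg h]
      have hred : (match (none : Option (PySem.Set Int)) with
          | none => false
          | some seen' => pvGoCross ts seen') = false := rfl
      rw [hred]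
      symm
      rw [decide_eq_false_iff_not]
      rintro ⟨hdisj, hnd⟩
      apply h
      simp only [List.flatMap_cons, List.nodup_append, List.mem_append] at hdisj hnd
      exact ⟨fun x hx => hdisj x (Or.inl hx), hnd.1⟩

-- adjacent-distinct on a (≤)-sorted list decides Nodup
theorem pv_adj_all (g : List Int) (h : g.Pairwise (fun a b => a ≤ b)) :
    ((g.zip g.tail).all (fun p => p.1 != p.2)) = decide g.Nodup := by
  induction g with
  | nil => simp
  | cons a g ih =>
    cases g with
    | nil => simp
    | cons b g' =>
      have hpw : (b :: g').Pairwise (fun a b => a ≤ b) := h.tail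
      have hab : a ≤ b := (List.pairwise_cons.mp h).1 b (by simp)
      have hble : ∀ x ∈ g', b ≤ x := fun x hx => (List.pairwise_cons.mp hpw).1 x hx
      have hrec := ih hpw
      simp only [List.tail_cons, List.zip_cons_cons, List.all_cons] at hrec ⊢
      rw [hrec]
      by_cases hne : a = b
      · subst hne
        simp
      · have hnm : a ∉ b :: g' := by
          simp only [List.mem_cons]
          rintro (rfl | hmem)
          · exact hne rfl
          · exact hne (le_antisymm hab (hble a hmem))
        rw [bne_iff_ne.mpr hne, Bool.true_and]
        apply decide_eq_decide.mpr
        exact ⟨fun h2 => List.nodup_cons.mpr ⟨hnm, h2⟩, fun h2 => h2.of_cons⟩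

-- ===== VERDICT (by name: the statement is the Claim_ definition above) =====
theorem is_valid_transition_py_spec : Claim_equal_is_valid_transition_py := by
  intro transition _
  unfold Spec_is_valid_transition_py
  simp only [is_valid_transition_py, is_valid_transition_py_alt]
  rw [pvGoCross_eq _ _ (by simp [PySem.Set.empty])]
  rw [PySem.List.slice_from_one]
  rw [pv_adj_all _ (PySem.List.sorted_pairwise _ _)]
  apply decide_eq_decide.mpr
  have hperm := PySem.List.sorted_perm (transition.flatMap (fun crossing => crossing)) (fun x => x) false
  constructor
  · rintro ⟨_, hnd⟩; exact hperm.nodup_iff.mpr hnd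
  · intro hnd
    exact ⟨by simp [PySem.Set.empty], hperm.nodup_iff.mp hnd⟩
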